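-- pv_equiv track=rewrite | github.com/wumusill/Na | Greedy/question_6.py | solution
-- ===== SOURCE A (Python) =====
-- def solution(food_times, k):
--     second = 0
--     table = 0
--     num_table = len(food_times)
--     while True:
--         if food_times.count(0) == num_table:
--             return -1
--
--
--         if k == second:
--             table += 1
--             break
--
--         if table == num_table:
--             table = 0
--
--         if food_times[table] == 0:
--             table += 1
--         else:
--             food_times[table] -= 1
--             second += 1
--             table += 1
--
--     if table > num_table:
--         return table - num_table
--     else:
--         return table
-- ===== SOURCE B (Python) =====
-- def solution(food_times, k):
--     # Round-based: one bulk pass per full cycle of the tables instead of a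
--     # per-second pointer walk with an O(n) all-zero scan on every second.
--     n = len(food_times)
--     foods = list(food_times)
--     p = 0
--     while True:
--         nz = [i for i in range(n) if foods[i] != 0]
--         if not nz:
--             return -1
--         if k < len(nz):
--             if k > 0:
--                 p = nz[k - 1] + 1
--             return p % n + 1
--         k -= len(nz)
--         for i in nz:
--             foods[i] -= 1
--         p = nz[-1] + 1
-- ===== Notes on version B (the rewrite author's own statement) =====
-- stated objective: faster
-- what changed: B replaces A's per-second pointer walk (which rescans the whole list with count(0) on every iteration) by a round-based loop that processes one full cycle of the tables at a time: it collects the non-empty tables once per round, consumes len(nz) seconds in bulk, and answers directly from the k-th remaining index in the final partial round.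
-- outside the precondition, e.g. on solution([2], -1): A returns -1, B returns 1; on solution([-1], -1): A does not finish within the time limit, B returns 1
import Mathlib
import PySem

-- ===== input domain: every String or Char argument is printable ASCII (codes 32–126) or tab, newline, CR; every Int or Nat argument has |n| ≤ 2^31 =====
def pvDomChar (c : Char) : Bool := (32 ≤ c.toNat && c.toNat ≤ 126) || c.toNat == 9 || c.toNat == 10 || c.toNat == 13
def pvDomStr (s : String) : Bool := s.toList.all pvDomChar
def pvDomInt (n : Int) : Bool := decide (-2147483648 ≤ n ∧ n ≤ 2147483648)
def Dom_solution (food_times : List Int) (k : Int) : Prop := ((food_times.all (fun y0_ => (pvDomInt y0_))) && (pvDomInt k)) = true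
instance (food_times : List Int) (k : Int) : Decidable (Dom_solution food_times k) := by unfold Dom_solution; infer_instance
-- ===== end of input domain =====

-- B replaces A's per-second simulation (with an O(n) zero-count every second) by bulk
-- whole-round passes over the non-empty tables (faster); A mutates its list argument in
-- place while B does not — the equivalence proved here is about the return value only.


-- ===== PORT A =====
-- literal transliteration of A's while-loop; `fuel` only bounds the number of loop
-- iterations (chosen large enough for every terminating run; 0 is the ran-out sentinel,
-- never returned by a completed run).
def loopA (fuel : Nat) (f : List Int) (second table k n : Int) : Int :=
  match fuel with
  | 0 => 0
  | fuel + 1 =>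
    if (f.count 0 : Int) = n then -1
    else if k = second then (if table + 1 > n then table + 1 - n else table + 1)
    else
      let t := if table = n then 0 else table
      let x := PySem.List.pyGetD f t 0
      if x = 0 then loopA fuel f second (t + 1) k n
      else loopA fuel (PySem.List.pySetD f t (x - 1)) (second + 1) (t + 1) k n

def solution (food_times : List Int) (k : Int) : Int :=
  loopA ((k.toNat + (food_times.map Int.toNat).sum + 1) * (food_times.length + 2) + 2)
    food_times 0 0 k (food_times.length : Int)

-- ===== PORT B =====
-- literal transliteration of Source B's round loop
def loopB (foods : List Int) (k p n : Int) : Int :=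
  let nz : List Int :=
    (PySem.List.pyRange 0 n 1).filter (fun i => decide (PySem.List.pyGetD foods i 0 ≠ 0))
  if hnz : nz = [] then -1
  else if hk : k < (nz.length : Int) then
    (if 0 < k then PySem.Int.mod (PySem.List.pyGetD nz (k - 1) 0 + 1) n + 1
     else PySem.Int.mod p n + 1)
  else
    loopB (nz.foldl (fun fs i => PySem.List.pySetD fs i (PySem.List.pyGetD fs i 0 - 1)) foods)
      (k - (nz.length : Int)) (PySem.List.pyGetD nz (-1) 0 + 1) n
termination_by k.toNat
decreasing_by
  have h1 := List.length_pos_of_ne_nil hnz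
  show (k - (nz.length : Int)).toNat < k.toNat
  omega

def solution_alt (food_times : List Int) (k : Int) : Int :=
  loopB food_times k 0 (food_times.length : Int)

-- ===== PRECONDITION & SPEC =====
-- Pre_ restricts to the task's natural domain of nonnegative waiting times k: for k < 0
-- A never hits its `k == second` exit, so it loops until every food count reaches zero,
-- returning -1 only by exhaustion (and diverging whenever some food time is negative);
-- B's round loop instead stops as soon as fewer than k tables remain.
def Pre_solution (food_times : List Int) (k : Int) : Prop := 0 ≤ k
instance (food_times : List Int) (k : Int) : Decidable (Pre_solution food_times k) := by
  unfold Pre_solution; infer_instance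
def pvWitness_solution : List Int × Int := ([3, 1, 2], 5)

def Spec_solution (food_times : List Int) (k : Int) (out : Int) : Prop := out = solution_alt food_times k
instance (food_times : List Int) (k : Int) (out : Int) : Decidable (Spec_solution food_times k out) := by unfold Spec_solution; infer_instance

-- ===== CLAIM (what is proved, stated in full; the proofs are below) =====
def Claim_equal_solution : Prop := ∀ (food_times : List Int) (k : Int), Dom_solution food_times k → Pre_solution food_times k → Spec_solution food_times k (solution food_times k)

-- ===== LEMMAS AND PROOFS =====

-- indices ≥ t holding a nonzero entry, in ascending order
def nzIdx (f : List Int) (t : Nat) : List Nat :=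
  (List.range f.length).filter (fun i => decide (t ≤ i ∧ f.getD i 0 ≠ 0))

-- decrement every nonzero entry at an index ≥ t
def decFrom (t : Nat) (f : List Int) : List Int :=
  f.mapIdx (fun i x => if t ≤ i ∧ x ≠ 0 then x - 1 else x)

lemma getD_set_ne (f : List Int) (t i : Nat) (v : Int) (h : t ≠ i) :
    (f.set t v).getD i 0 = f.getD i 0 := by
  simp [List.getD_eq_getElem?_getD, List.getElem?_set_ne h]

lemma nzIdx_eq_range' (f : List Int) (t : Nat) (ht : t ≤ f.length) :
    nzIdx f t = (List.range' t (f.length - t)).filter (fun i => decide (f.getD i 0 ≠ 0)) := by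
  unfold nzIdx
  rw [List.range_eq_range']
  have hsplit : List.range' 0 f.length = List.range' 0 t ++ List.range' t (f.length - t) := by
    have h := List.range'_append (s := 0) (m := t) (n := f.length - t) (step := 1)
    simpa [Nat.add_sub_cancel' ht] using h.symm
  rw [hsplit, List.filter_append]
  have h1 : (List.range' 0 t).filter (fun i => decide (t ≤ i ∧ f.getD i 0 ≠ 0)) = [] := by
    rw [List.filter_eq_nil_iff]
    intro i hi
    have : i < t := by
      have := List.mem_range'_1.mp hi; omega
    simp; omega
  rw [h1, List.nil_append]
  apply List.filter_congr
  intro i hi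
  have : t ≤ i := by
    have := List.mem_range'_1.mp hi; omega
  simp [this]

lemma mem_nzIdx {f : List Int} {t j : Nat} :
    j ∈ nzIdx f t ↔ j < f.length ∧ t ≤ j ∧ f.getD j 0 ≠ 0 := by
  unfold nzIdx
  simp [List.mem_filter, List.mem_range]

lemma nzIdx_len (f : List Int) : nzIdx f f.length = [] := by
  rw [List.eq_nil_iff_forall_not_mem]
  intro j hj
  have := mem_nzIdx.mp hj
  omega

lemma nzIdx_nil_of_all_zero {f : List Int} (h : ∀ x ∈ f, x = 0) (t : Nat) :
    nzIdx f t = [] := by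
  rw [List.eq_nil_iff_forall_not_mem]
  intro j hj
  obtain ⟨h1, h2, h3⟩ := mem_nzIdx.mp hj
  exact h3 (h _ (by rw [List.getD_eq_getElem _ _ h1]; exact List.getElem_mem h1))

lemma all_zero_of_nzIdx_nil {f : List Int} (h : nzIdx f 0 = []) : ∀ x ∈ f, x = 0 := by
  intro x hx
  obtain ⟨j, hj, rfl⟩ := List.getElem_of_mem hx
  by_contra hne
  have : j ∈ nzIdx f 0 := mem_nzIdx.mpr ⟨hj, Nat.zero_le _, by rwa [List.getD_eq_getElem _ _ hj]⟩
  simp [h] at this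

lemma count_eq_iff_all_zero (f : List Int) :
    ((f.count 0 : Int) = (f.length : Int)) ↔ ∀ x ∈ f, x = 0 := by
  rw [Int.natCast_inj, List.count_eq_length]
  constructor <;> intro h x hx <;> exact (h x hx).symm

lemma count_ne_of_mem_nzIdx {f : List Int} {t j : Nat} (h : j ∈ nzIdx f t) :
    ¬ ((f.count 0 : Int) = (f.length : Int)) := by
  rw [count_eq_iff_all_zero]
  intro hall
  obtain ⟨h1, h2, h3⟩ := mem_nzIdx.mp h
  exact h3 (hall _ (by rw [List.getD_eq_getElem _ _ h1]; exact List.getElem_mem h1))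

lemma nzIdx_skip {f : List Int} {t : Nat} (ht : t < f.length) (h : f.getD t 0 = 0) :
    nzIdx f t = nzIdx f (t + 1) := by
  rw [nzIdx_eq_range' f t (by omega), nzIdx_eq_range' f (t+1) (by omega)]
  have hd : f.length - t = (f.length - (t+1)) + 1 := by omega
  rw [hd, List.range'_succ, List.filter_cons]
  have h' : f[t]?.getD 0 = 0 := by rw [← List.getD_eq_getElem?_getD]; exact h
  simp [h']

lemma nzIdx_cons {f : List Int} {t : Nat} (ht : t < f.length) (h : f.getD t 0 ≠ 0) :
    nzIdx f t = t :: nzIdx f (t + 1) := by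
  rw [nzIdx_eq_range' f t (by omega), nzIdx_eq_range' f (t+1) (by omega)]
  have hd : f.length - t = (f.length - (t+1)) + 1 := by omega
  rw [hd, List.range'_succ, List.filter_cons]
  have h' : ¬ (f[t]?.getD 0 = 0) := by rw [← List.getD_eq_getElem?_getD]; exact h
  simp [h']

lemma nzIdx_set_higher {f : List Int} {t : Nat} (v : Int) (ht : t < f.length) :
    nzIdx (f.set t v) (t + 1) = nzIdx f (t + 1) := by
  rw [nzIdx_eq_range' _ (t+1) (by simp; omega), nzIdx_eq_range' f (t+1) (by omega)]
  rw [List.length_set]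
  apply List.filter_congr
  intro i hi
  have : t + 1 ≤ i := (List.mem_range'_1.mp hi).1
  rw [getD_set_ne f t i v (by omega)]

lemma length_decFrom (t : Nat) (f : List Int) : (decFrom t f).length = f.length := by
  simp [decFrom]

lemma decFrom_eq_self {f : List Int} {t : Nat} (h : nzIdx f t = []) : decFrom t f = f := by
  apply List.ext_getElem (length_decFrom t f)
  intro i hi1 hi2
  have hmem : i ∉ nzIdx f t := by simp [h]
  rw [mem_nzIdx] at hmem
  push_neg at hmem
  simp only [decFrom, List.getElem_mapIdx]
  by_cases hcond : t ≤ i ∧ f[i] ≠ 0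
  · exfalso
    exact hcond.2 (by
      have := hmem hi2 hcond.1
      rwa [List.getD_eq_getElem _ _ hi2] at this)
  · simp [hcond]

lemma decFrom_skip {f : List Int} {t : Nat} (h : f.getD t 0 = 0) :
    decFrom t f = decFrom (t + 1) f := by
  apply List.ext_getElem (by rw [length_decFrom, length_decFrom])
  intro i hi1 hi2
  rw [length_decFrom] at hi1
  simp only [decFrom, List.getElem_mapIdx]
  by_cases hit : t = i
  · subst hit
    rw [List.getD_eq_getElem _ _ hi1] at h
    simp [h]
  · have : (t ≤ i) ↔ (t + 1 ≤ i) := by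
      constructor <;> intro <;> omega
    simp only [this]

lemma decFrom_set {f : List Int} {t : Nat} (ht : t < f.length) (v : Int)
    (hv : v = f.getD t 0 - 1) (h : f.getD t 0 ≠ 0) :
    decFrom (t + 1) (f.set t v) = decFrom t f := by
  have h' : f[t] ≠ 0 := by rw [List.getD_eq_getElem _ _ ht] at h; exact h
  have hv' : v = f[t] - 1 := by rw [List.getD_eq_getElem _ _ ht] at hv; exact hv
  apply List.ext_getElem (by simp [length_decFrom])
  intro i hi1 hi2
  rw [length_decFrom] at hi2
  simp only [decFrom, List.getElem_mapIdx, List.getElem_set]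
  by_cases hit : t = i
  · subst hit
    have h1 : ¬ (t + 1 ≤ t) := by omega
    simp [h1, h', hv']
  · have h2 : (t + 1 ≤ i) ↔ (t ≤ i) := by constructor <;> intro <;> omega
    simp only [hit, if_false, h2]

lemma loopA_succ (b : Nat) (f : List Int) (second table k n : Int) :
    loopA (b + 1) f second table k n =
      if (f.count 0 : Int) = n then -1
      else if k = second then (if table + 1 > n then table + 1 - n else table + 1)
      else if PySem.List.pyGetD f (if table = n then 0 else table) 0 = 0 then
        loopA b f second ((if table = n then 0 else table) + 1) k n
      else
        loopA b
          (PySem.List.pySetD f (if table = n then 0 else table)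
            (PySem.List.pyGetD f (if table = n then 0 else table) 0 - 1))
          (second + 1) ((if table = n then 0 else table) + 1) k n := rfl

lemma loopA_reset (b : Nat) (f : List Int) (second k : Int) :
    loopA b f second (f.length : Int) k (f.length : Int)
      = loopA b f second 0 k (f.length : Int) := by
  cases b with
  | zero => rfl
  | succ b =>
    rw [loopA_succ, loopA_succ]
    by_cases h1 : (f.count 0 : Int) = (f.length : Int)
    · simp [h1]
    · rw [if_neg h1, if_neg h1]
      by_cases h2 : k = second
      · rw [if_pos h2, if_pos h2]
        split_ifs <;> omega
      · rw [if_neg h2, if_neg h2]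
        have e1 : (if (f.length : Int) = (f.length : Int) then (0:Int) else (f.length : Int)) = 0 := by simp
        have e2 : (if (0 : Int) = (f.length : Int) then (0:Int) else 0) = 0 := by simp
        rw [e1, e2]

def castIdx (l : List Nat) : List Int := l.map (fun i : Nat => (i : Int))

lemma castIdx_nil : castIdx [] = [] := rfl

lemma castIdx_cons (a : Nat) (l : List Nat) : castIdx (a :: l) = (a : Int) :: castIdx l := rfl

lemma getD_castIdx (l : List Nat) (j : Nat) :
    (castIdx l).getD j 0 = ((l.getD j 0 : Nat) : Int) := by
  unfold castIdx
  rw [List.getD_eq_getElem?_getD, List.getD_eq_getElem?_getD, List.getElem?_map]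
  cases l[j]? <;> simp

lemma length_castIdx (l : List Nat) : (castIdx l).length = l.length := by simp [castIdx]

lemma getD_lt_of_lt {l : List Nat} {j : Nat} (hj : j < l.length) {m : Nat}
    (hall : ∀ x ∈ l, x < m) : l.getD j 0 < m := by
  rw [List.getD_eq_getElem _ _ hj]
  exact hall _ (List.getElem_mem hj)

lemma mem_lt_of_nzIdx {f : List Int} {t : Nat} : ∀ x ∈ nzIdx f t, x < f.length := by
  intro x hx; exact (mem_nzIdx.mp hx).1

lemma mod_zero_left (n : Int) (hn : 0 < n) : PySem.Int.mod 0 n = 0 := by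
  rw [PySem.Int.mod_eq_emod_of_pos hn]; simp

lemma mod_bridge (q : Nat) (len : Int) (hq : (q : Int) < len) :
    PySem.Int.mod ((q : Int) + 1) len + 1 =
      (if (q : Int) + 1 + 1 > len then (q : Int) + 1 + 1 - len else (q : Int) + 1 + 1) := by
  have hpos : (0 : Int) < len := by omega
  rw [PySem.Int.mod_eq_emod_of_pos hpos]
  by_cases hlt : (q : Int) + 1 < len
  · rw [Int.emod_eq_of_lt (by omega) hlt]
    split_ifs <;> omega
  · have he : (q : Int) + 1 = len := by omega
    rw [he, Int.emod_self]
    split_ifs <;> omega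

lemma fold_dec : ∀ (d t : Nat) (g : List Int), t + d = g.length →
    (castIdx (nzIdx g t)).foldl
      (fun fs i => PySem.List.pySetD fs i (PySem.List.pyGetD fs i 0 - 1)) g
      = decFrom t g := by
  intro d
  induction d with
  | zero =>
    intro t g ht
    have ht' : t = g.length := by omega
    subst ht'
    rw [nzIdx_len, castIdx_nil]
    simp [decFrom_eq_self (nzIdx_len g)]
  | succ d ih =>
    intro t g ht
    have htl : t < g.length := by omega
    by_cases hz : g.getD t 0 = 0
    · rw [nzIdx_skip htl hz, decFrom_skip hz]
      exact ih (t+1) g (by omega)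
    · rw [nzIdx_cons htl hz, castIdx_cons, List.foldl_cons]
      have e1 : PySem.List.pySetD g ((t : Nat) : Int) (PySem.List.pyGetD g ((t : Nat) : Int) 0 - 1)
          = g.set t (g.getD t 0 - 1) := by
        simp [PySem.List.pySetD_natCast, PySem.List.pyGetD_natCast]
      rw [e1]
      rw [← nzIdx_set_higher (f := g) (g.getD t 0 - 1) htl]
      rw [ih (t+1) (g.set t (g.getD t 0 - 1)) (by simp; omega)]
      exact decFrom_set htl _ rfl hz

lemma nz_bridge (f : List Int) (n : Int) (hn : n = (f.length : Int)) :
    (PySem.List.pyRange 0 n 1).filter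
        (fun i => decide (PySem.List.pyGetD f i 0 ≠ 0))
      = castIdx (nzIdx f 0) := by
  subst hn
  rw [PySem.List.pyRange_one]
  have e1 : ((f.length : Int) - 0).toNat = f.length := by omega
  rw [e1, List.filter_map]
  have e2 : (fun k : Nat => (0 : Int) + (k : Int)) = (fun i : Nat => (i : Int)) := by
    funext k; omega
  rw [e2]
  unfold castIdx nzIdx
  congr 1
  apply List.filter_congr
  intro i hi
  simp [Function.comp, PySem.List.pyGetD_natCast]

lemma sweep_a : ∀ (d : Nat) (f : List Int) (second k : Int) (t b : Nat),
    t + d = f.length →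
    ((nzIdx f t).length : Int) < k - second →
    loopA (b + d + 1) f second (t : Int) k (f.length : Int)
      = loopA (b + 1) (decFrom t f) (second + ((nzIdx f t).length : Int))
          (f.length : Int) k (f.length : Int) := by
  intro d
  induction d with
  | zero =>
    intro f second k t b ht hrem
    have ht' : t = f.length := by omega
    subst ht'
    rw [nzIdx_len, decFrom_eq_self (nzIdx_len f)]
    norm_num
  | succ d ih =>
    intro f second k t b ht hrem
    have htl : t < f.length := by omega
    have efuel : b + (d + 1) + 1 = b + d + 1 + 1 := by omega
    rw [efuel, loopA_succ]
    by_cases hall : (f.count 0 : Int) = (f.length : Int)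
    · have hz := (count_eq_iff_all_zero f).mp hall
      have hnil := nzIdx_nil_of_all_zero hz t
      rw [if_pos hall, hnil, decFrom_eq_self hnil, loopA_succ, if_pos hall]
    · have hne : k ≠ second := by omega
      rw [if_neg hall, if_neg hne]
      have htne : (if (t : Int) = (f.length : Int) then (0:Int) else (t:Int)) = (t:Int) := by
        rw [if_neg]; omega
      rw [htne, PySem.List.pyGetD_natCast]
      have e1 : ((t:Int) + 1) = ((t+1 : Nat) : Int) := by push_cast; ring
      by_cases hz : f.getD t 0 = 0
      · rw [if_pos hz, e1]
        rw [ih f second k (t+1) b (by omega) (by rw [← nzIdx_skip htl hz]; exact hrem)]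
        rw [← nzIdx_skip htl hz, ← decFrom_skip hz]
      · rw [if_neg hz, PySem.List.pySetD_natCast, e1]
        have hcons := nzIdx_cons htl hz
        have hhigher := nzIdx_set_higher (f := f) (f.getD t 0 - 1) htl
        have hlen_nz : (nzIdx f t).length = (nzIdx (f.set t (f.getD t 0 - 1)) (t+1)).length + 1 := by
          rw [hcons, hhigher]; simp
        have hlen' : (f.set t (f.getD t 0 - 1)).length = f.length := by simp
        have ihh := ih (f.set t (f.getD t 0 - 1)) (second + 1) k (t+1) b
          (by rw [hlen']; omega) (by omega)
        rw [hlen'] at ihh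
        rw [ihh, decFrom_set htl _ rfl hz]
        have e2 : second + 1 + ((nzIdx (f.set t (f.getD t 0 - 1)) (t+1)).length : Int)
            = second + ((nzIdx f t).length : Int) := by omega
        rw [e2]

lemma sweep_b1 : ∀ (d : Nat) (f : List Int) (second k : Int) (t b : Nat),
    t + d = f.length →
    1 ≤ k - second →
    k - second < ((nzIdx f t).length : Int) →
    loopA (b + d + 1) f second (t : Int) k (f.length : Int)
      = (if ((nzIdx f t).getD (k - second - 1).toNat 0 : Int) + 1 + 1 > (f.length : Int)
         then ((nzIdx f t).getD (k - second - 1).toNat 0 : Int) + 1 + 1 - (f.length : Int)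
         else ((nzIdx f t).getD (k - second - 1).toNat 0 : Int) + 1 + 1) := by
  intro d
  induction d with
  | zero =>
    intro f second k t b ht hrem1 hrem2
    have ht' : t = f.length := by omega
    subst ht'
    rw [nzIdx_len] at hrem2
    simp at hrem2
    omega
  | succ d ih =>
    intro f second k t b ht hrem1 hrem2
    have htl : t < f.length := by omega
    have efuel : b + (d + 1) + 1 = b + d + 1 + 1 := by omega
    rw [efuel, loopA_succ]
    by_cases hall : (f.count 0 : Int) = (f.length : Int)
    · exfalso
      have hz := (count_eq_iff_all_zero f).mp hall
      rw [nzIdx_nil_of_all_zero hz t] at hrem2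
      simp at hrem2
      omega
    · have hne : k ≠ second := by omega
      rw [if_neg hall, if_neg hne]
      have htne : (if (t : Int) = (f.length : Int) then (0:Int) else (t:Int)) = (t:Int) := by
        rw [if_neg]; omega
      rw [htne, PySem.List.pyGetD_natCast]
      have e1 : ((t:Int) + 1) = ((t+1 : Nat) : Int) := by push_cast; ring
      by_cases hz : f.getD t 0 = 0
      · rw [if_pos hz, e1]
        rw [ih f second k (t+1) b (by omega) hrem1 (by rw [← nzIdx_skip htl hz]; exact hrem2)]
        rw [← nzIdx_skip htl hz]
      · rw [if_neg hz, PySem.List.pySetD_natCast, e1]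
        have hcons := nzIdx_cons htl hz
        have hhigher := nzIdx_set_higher (f := f) (f.getD t 0 - 1) htl
        have hlen_nz : (nzIdx f t).length = (nzIdx (f.set t (f.getD t 0 - 1)) (t+1)).length + 1 := by
          rw [hcons, hhigher]; simp
        have hlen' : (f.set t (f.getD t 0 - 1)).length = f.length := by simp
        by_cases hrem : k - second = 1
        · -- the bite that was just taken is the k-th one: the next loop head breaks
          have hcnonnil : nzIdx (f.set t (f.getD t 0 - 1)) (t+1) ≠ [] := by
            intro hnil
            have h0 : (nzIdx (f.set t (f.getD t 0 - 1)) (t+1)).length = 0 := by rw [hnil]; rfl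
            omega
          obtain ⟨j, hj⟩ : ∃ j, j ∈ nzIdx (f.set t (f.getD t 0 - 1)) (t+1) :=
            ⟨_, List.head_mem hcnonnil⟩
          have hcne := count_ne_of_mem_nzIdx hj
          rw [hlen'] at hcne
          rw [loopA_succ, if_neg hcne, if_pos (by omega : k = second + 1)]
          have hq : (k - second - 1).toNat = 0 := by omega
          rw [hq, hcons, List.getD_cons_zero]
          push_cast
          split_ifs <;> omega
        · have ihh := ih (f.set t (f.getD t 0 - 1)) (second + 1) k (t+1) b
            (by rw [hlen']; omega) (by omega) (by omega)
          rw [hlen'] at ihh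
          rw [ihh, hhigher]
          have hq : (k - second - 1).toNat = (k - (second + 1) - 1).toNat + 1 := by omega
          rw [hq, hcons, List.getD_cons_succ]

lemma sweep_b2 : ∀ (d : Nat) (f : List Int) (second k : Int) (t b : Nat),
    t + d = f.length →
    1 ≤ k - second →
    k - second = ((nzIdx f t).length : Int) →
    loopA (b + d + 1) f second (t : Int) k (f.length : Int)
      = (if ((decFrom t f).count 0 : Int) = (f.length : Int) then -1
         else
           (if ((nzIdx f t).getD ((nzIdx f t).length - 1) 0 : Int) + 1 + 1 > (f.length : Int)
            then ((nzIdx f t).getD ((nzIdx f t).length - 1) 0 : Int) + 1 + 1 - (f.length : Int)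
            else ((nzIdx f t).getD ((nzIdx f t).length - 1) 0 : Int) + 1 + 1)) := by
  intro d
  induction d with
  | zero =>
    intro f second k t b ht hrem1 hrem2
    have ht' : t = f.length := by omega
    subst ht'
    rw [nzIdx_len] at hrem2
    simp at hrem2
    omega
  | succ d ih =>
    intro f second k t b ht hrem1 hrem2
    have htl : t < f.length := by omega
    have efuel : b + (d + 1) + 1 = b + d + 1 + 1 := by omega
    rw [efuel, loopA_succ]
    by_cases hall : (f.count 0 : Int) = (f.length : Int)
    · exfalso
      have hz := (count_eq_iff_all_zero f).mp hall
      rw [nzIdx_nil_of_all_zero hz t] at hrem2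
      simp at hrem2
      omega
    · have hne : k ≠ second := by omega
      rw [if_neg hall, if_neg hne]
      have htne : (if (t : Int) = (f.length : Int) then (0:Int) else (t:Int)) = (t:Int) := by
        rw [if_neg]; omega
      rw [htne, PySem.List.pyGetD_natCast]
      have e1 : ((t:Int) + 1) = ((t+1 : Nat) : Int) := by push_cast; ring
      by_cases hz : f.getD t 0 = 0
      · rw [if_pos hz, e1]
        rw [ih f second k (t+1) b (by omega) hrem1 (by rw [← nzIdx_skip htl hz]; exact hrem2)]
        rw [← nzIdx_skip htl hz, ← decFrom_skip hz]
      · rw [if_neg hz, PySem.List.pySetD_natCast, e1]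
        have hcons := nzIdx_cons htl hz
        have hhigher := nzIdx_set_higher (f := f) (f.getD t 0 - 1) htl
        have hlen_nz : (nzIdx f t).length = (nzIdx (f.set t (f.getD t 0 - 1)) (t+1)).length + 1 := by
          rw [hcons, hhigher]; simp
        have hlen' : (f.set t (f.getD t 0 - 1)).length = f.length := by simp
        have hdec := decFrom_set htl (f.getD t 0 - 1) rfl hz
        by_cases hrem : k - second = 1
        · -- the final bite of the last round: afterwards A either sees an empty table (-1)
          -- or breaks at the following position
          have hnil : nzIdx (f.set t (f.getD t 0 - 1)) (t+1) = [] := by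
            have h2 : (nzIdx (f.set t (f.getD t 0 - 1)) (t+1)).length = 0 := by omega
            exact List.eq_nil_of_length_eq_zero h2
          have hfix : decFrom t f = f.set t (f.getD t 0 - 1) := by
            rw [← hdec, decFrom_eq_self hnil]
          rw [loopA_succ]
          rw [hfix]
          by_cases hcz : ((f.set t (f.getD t 0 - 1)).count 0 : Int) = (f.length : Int)
          · rw [if_pos hcz, if_pos hcz]
          · rw [if_neg hcz, if_neg hcz, if_pos (by omega : k = second + 1)]
            have hq : (nzIdx f t).length - 1 = 0 := by omega
            rw [hq, hcons, List.getD_cons_zero]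
            push_cast
            split_ifs <;> omega
        · have ihh := ih (f.set t (f.getD t 0 - 1)) (second + 1) k (t+1) b
            (by rw [hlen']; omega) (by omega) (by omega)
          rw [hlen'] at ihh
          rw [ihh, hhigher, hdec]
          have hq : (nzIdx f t).length - 1 = ((nzIdx f (t+1)).length - 1) + 1 := by
            have : (nzIdx f t).length = (nzIdx f (t+1)).length + 1 := by rw [hcons]; simp
            omega
          rw [hq, hcons, List.getD_cons_succ]

lemma pyGetD_neg_one_castIdx (l : List Nat) (h : l ≠ []) :
    PySem.List.pyGetD (castIdx l) (-1) 0 = ((l.getD (l.length - 1) 0 : Nat) : Int) := by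
  have hc : castIdx l ≠ [] := by
    intro hh
    have := congrArg List.length hh
    rw [length_castIdx] at this
    exact h (List.eq_nil_of_length_eq_zero this)
  rw [PySem.List.pyGetD_neg_one _ _ hc, List.getLast_eq_getElem]
  have hlp : 0 < l.length := List.length_pos_of_ne_nil h
  unfold castIdx
  rw [List.getD_eq_getElem _ _ (by omega : l.length - 1 < l.length)]
  simp

lemma castIdx_ne_nil {l : List Nat} (h : l ≠ []) : castIdx l ≠ [] := by
  intro hh
  have := congrArg List.length hh
  rw [length_castIdx] at this
  exact h (List.eq_nil_of_length_eq_zero this)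

lemma main_loop : ∀ (rem : Nat) (f : List Int) (second k p : Int) (b : Nat),
    k - second = (rem : Int) →
    (rem = 0 → p = 0) →
    (rem + 1) * (f.length + 2) + 2 ≤ b →
    loopA b f second 0 k (f.length : Int) = loopB f (rem : Int) p (f.length : Int) := by
  intro rem
  induction rem using Nat.strong_induction_on with
  | _ rem ih =>
  intro f second k p b hks hp hb
  obtain ⟨b', rfl⟩ : ∃ b'', b = b'' + 1 := by
    refine ⟨b - 1, ?_⟩
    omega
  rw [loopB]
  rw [nz_bridge f _ rfl]
  by_cases hLnil : nzIdx f 0 = []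
  · -- every table is already empty: both sides return -1
    have hall : (f.count 0 : Int) = (f.length : Int) :=
      (count_eq_iff_all_zero f).mpr (all_zero_of_nzIdx_nil hLnil)
    rw [loopA_succ, if_pos hall, hLnil, castIdx_nil, dif_pos rfl]
  · obtain ⟨j, hj⟩ : ∃ j, j ∈ nzIdx f 0 := ⟨_, List.head_mem hLnil⟩
    have hjl : j < f.length := (mem_nzIdx.mp hj).1
    have hlenpos : 0 < f.length := by omega
    have hc1 : 0 < (nzIdx f 0).length := List.length_pos_of_ne_nil hLnil
    have hallne := count_ne_of_mem_nzIdx hj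
    rw [dif_neg (castIdx_ne_nil hLnil)]
    by_cases hr0 : rem = 0
    · subst hr0
      have hp0 : p = 0 := hp rfl
      rw [dif_pos (by rw [length_castIdx]; exact_mod_cast hc1)]
      rw [if_neg (by omega : ¬ (0:Int) < ((0:Nat):Int)), hp0,
        mod_zero_left _ (by exact_mod_cast hlenpos)]
      rw [loopA_succ, if_neg hallne, if_pos (by omega : k = second)]
      rw [if_neg (by omega : ¬ ((0:Int) + 1 > (f.length : Int)))]
    · by_cases hlt : rem < (nzIdx f 0).length
      · -- the answer falls inside this round
        have hmul : 1 * (f.length + 2) ≤ (rem + 1) * (f.length + 2) :=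
          Nat.mul_le_mul_right _ (by omega)
        rw [one_mul] at hmul
        obtain ⟨b2, rfl⟩ : ∃ b2, b' = b2 + f.length := ⟨b' - f.length, by omega⟩
        have hA := sweep_b1 f.length f second k 0 b2 (by omega) (by omega) (by omega)
        rw [Nat.cast_zero] at hA
        rw [hA]
        rw [dif_pos (by rw [length_castIdx]; exact_mod_cast hlt)]
        rw [if_pos (by omega : (0:Int) < ((rem:Nat):Int))]
        have ecast : ((rem : Nat) : Int) - 1 = (((rem - 1 : Nat)) : Int) := by omega
        rw [ecast, PySem.List.pyGetD_natCast, getD_castIdx]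
        have eq1 : (k - second - 1).toNat = rem - 1 := by omega
        rw [eq1]
        have hqlt : ((nzIdx f 0).getD (rem - 1) 0 : Int) < (f.length : Int) := by
          have := getD_lt_of_lt (l := nzIdx f 0) (by omega : rem - 1 < (nzIdx f 0).length)
            mem_lt_of_nzIdx
          exact_mod_cast this
        rw [mod_bridge _ _ hqlt]
      · -- the current round is taken in full
        have hmul : 1 * (f.length + 2) ≤ (rem + 1) * (f.length + 2) :=
          Nat.mul_le_mul_right _ (by omega)
        rw [one_mul] at hmul
        obtain ⟨b2, rfl⟩ : ∃ b2, b' = b2 + f.length := ⟨b' - f.length, by omega⟩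
        have hfold := fold_dec f.length 0 f (by omega)
        have hlen2 : (decFrom 0 f).length = f.length := length_decFrom 0 f
        have hcond : ¬ (((rem:Nat):Int) < ((castIdx (nzIdx f 0)).length : Int)) := by
          rw [length_castIdx]; omega
        rw [dif_neg hcond, hfold]
        by_cases hrc : rem = (nzIdx f 0).length
        · -- the k-th bite is the last one of this round
          have hA := sweep_b2 f.length f second k 0 b2 (by omega) (by omega) (by omega)
          rw [Nat.cast_zero] at hA
          rw [hA]
          have ek : ((rem:Nat):Int) - ((castIdx (nzIdx f 0)).length : Int) = ((0:Nat) : Int) := by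
            rw [length_castIdx]; omega
          rw [ek, loopB]
          rw [nz_bridge (decFrom 0 f) _ (by rw [hlen2])]
          rw [pyGetD_neg_one_castIdx _ hLnil]
          by_cases hnil2 : nzIdx (decFrom 0 f) 0 = []
          · have hall2 : ((decFrom 0 f).count 0 : Int) = (f.length : Int) := by
              rw [← hlen2]
              exact (count_eq_iff_all_zero _).mpr (all_zero_of_nzIdx_nil hnil2)
            rw [if_pos hall2, hnil2, castIdx_nil, dif_pos rfl]
          · obtain ⟨j2, hj2⟩ : ∃ j2, j2 ∈ nzIdx (decFrom 0 f) 0 := ⟨_, List.head_mem hnil2⟩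
            have hallne2 := count_ne_of_mem_nzIdx hj2
            rw [hlen2] at hallne2
            rw [if_neg hallne2, dif_neg (castIdx_ne_nil hnil2)]
            have hc2 : 0 < (nzIdx (decFrom 0 f) 0).length := List.length_pos_of_ne_nil hnil2
            rw [dif_pos (by rw [length_castIdx]; exact_mod_cast hc2)]
            rw [if_neg (by omega : ¬ (0:Int) < ((0:Nat):Int))]
            have hqlt : ((nzIdx f 0).getD ((nzIdx f 0).length - 1) 0 : Int) < (f.length : Int) := by
              have := getD_lt_of_lt (l := nzIdx f 0)
                (by omega : (nzIdx f 0).length - 1 < (nzIdx f 0).length) mem_lt_of_nzIdx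
              exact_mod_cast this
            rw [mod_bridge _ _ hqlt]
        · -- strictly more rounds remain: one bulk round, then induction
          have hgt : (nzIdx f 0).length < rem := by omega
          have hA := sweep_a f.length f second k 0 b2 (by omega) (by omega)
          rw [Nat.cast_zero] at hA
          rw [hA]
          have hreset := loopA_reset (b2 + 1) (decFrom 0 f) (second + ((nzIdx f 0).length : Int)) k
          rw [hlen2] at hreset
          rw [hreset]
          have ek : ((rem:Nat):Int) - ((castIdx (nzIdx f 0)).length : Int)
              = (((rem - (nzIdx f 0).length : Nat)) : Int) := by
            rw [length_castIdx]; push_cast; omega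
          rw [ek]
          have key : (rem - (nzIdx f 0).length + 2) * (f.length + 2) ≤ (rem + 1) * (f.length + 2) :=
            Nat.mul_le_mul_right _ (by omega)
          have expand : (rem - (nzIdx f 0).length + 2) * (f.length + 2)
              = (rem - (nzIdx f 0).length + 1) * (f.length + 2) + (f.length + 2) := by ring
          have ihh := ih (rem - (nzIdx f 0).length) (by omega) (decFrom 0 f)
            (second + ((nzIdx f 0).length : Int)) k
            (PySem.List.pyGetD (castIdx (nzIdx f 0)) (-1) 0 + 1) (b2 + 1)
            (by omega) (by omega) (by rw [hlen2]; omega)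
          rw [hlen2] at ihh
          exact ihh

theorem solution_spec : Claim_equal_solution := by
  intro f k hdom hpre
  unfold Pre_solution at hpre
  unfold Spec_solution solution solution_alt
  have hk : k = ((k.toNat : Nat) : Int) := by omega
  have hmul : (k.toNat + 1) * (f.length + 2) ≤ (k.toNat + (f.map Int.toNat).sum + 1) * (f.length + 2) :=
    Nat.mul_le_mul_right _ (by omega)
  have := main_loop k.toNat f 0 k 0 ((k.toNat + (f.map Int.toNat).sum + 1) * (f.length + 2) + 2)
    (by omega) (by intro _; rfl) (by omega)
  rw [this, ← hk]
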